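-- pv_equiv track=rewrite | github.com/vicekha/SIFE-LDM- | sife/multiscale.py | create_multiscale_shapes
-- ===== SOURCE A (Python) =====
-- from typing import Tuple, Optional, List, Sequence, NamedTuple, Dict, Any
--
-- def create_multiscale_shapes(
--     base_seq_len: int,
--     num_levels: int,
--     embed_dim: int
-- ) -> List[Tuple[int, int]]:
--     """
--     Create shapes for each level of the hierarchy.
--
--     Args:
--         base_seq_len: Sequence length at finest scale
--         num_levels: Number of hierarchy levels
--         embed_dim: Embedding dimension
--
--     Returns:
--         List of (seq_len, embed_dim) tuples for each level
--     """
--     shapes = []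
--     seq_len = base_seq_len
--
--     for level in range(num_levels):
--         shapes.append((seq_len, embed_dim))
--         seq_len = seq_len // 2  # Halve at each level
--
--     return shapes
-- ===== SOURCE B (Python) =====
-- def create_multiscale_shapes(
--     base_seq_len: int,
--     num_levels: int,
--     embed_dim: int
-- ):
--     # Closed form: level k's seq_len is base_seq_len arithmetically shifted right by k
--     # (= floor division by 2**k), computed independently per level instead of
--     # threading a running value through the loop.
--     return [(base_seq_len >> level, embed_dim) for level in range(num_levels)]
-- ===== Notes on version B (the rewrite author's own statement) =====
-- stated objective: simpler
-- what changed: Replaces the loop-carried halving accumulator with a direct closed-form per-level computation base_seq_len >> level (floor division by 2**level), valid because iterated floor-halving equals one arithmetic right shift (also for negatives).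
import Mathlib
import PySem

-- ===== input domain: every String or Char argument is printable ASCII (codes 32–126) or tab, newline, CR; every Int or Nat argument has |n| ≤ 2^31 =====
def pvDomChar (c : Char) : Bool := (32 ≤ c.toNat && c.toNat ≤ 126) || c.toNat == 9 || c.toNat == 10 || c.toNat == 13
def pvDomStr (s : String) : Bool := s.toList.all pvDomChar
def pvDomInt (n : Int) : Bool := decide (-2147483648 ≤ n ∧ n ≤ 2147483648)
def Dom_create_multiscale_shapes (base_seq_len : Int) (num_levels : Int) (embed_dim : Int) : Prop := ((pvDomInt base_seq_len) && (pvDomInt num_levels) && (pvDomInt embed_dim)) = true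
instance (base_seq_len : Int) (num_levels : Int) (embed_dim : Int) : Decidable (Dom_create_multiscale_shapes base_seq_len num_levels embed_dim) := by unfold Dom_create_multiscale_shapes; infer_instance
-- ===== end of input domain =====

-- B replaces A's loop-carried halving accumulator by a closed-form per-level
-- floor division by 2**level (objective: simpler).

-- ===== PORT A =====
-- loop: for level in range(num_levels): shapes.append((seq_len, embed_dim)); seq_len = seq_len // 2
def create_multiscale_shapes (base_seq_len : Int) (num_levels : Int) (embed_dim : Int) : List (Int × Int) :=
  (((PySem.List.pyRange 0 num_levels 1).foldl
      (fun (st : List (Int × Int) × Int) (_level : Int) =>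
        (st.1 ++ [(st.2, embed_dim)], PySem.Int.floordiv st.2 2))
      ([], base_seq_len))).1

-- ===== PORT B =====
-- [(base_seq_len >> level, embed_dim) for level in range(num_levels)]
-- Python's '>>' on int is Lean's '>>>' on Int (arithmetic shift, floors on negatives);
-- level is nonnegative inside range, so '.toNat' is exact here.
def create_multiscale_shapes_alt (base_seq_len : Int) (num_levels : Int) (embed_dim : Int) : List (Int × Int) :=
  (PySem.List.pyRange 0 num_levels 1).map
    (fun level => (base_seq_len >>> level.toNat, embed_dim))

-- ===== PRECONDITION & SPEC =====
def Spec_create_multiscale_shapes (base_seq_len : Int) (num_levels : Int) (embed_dim : Int) (out : List (Int × Int)) : Prop := out = create_multiscale_shapes_alt base_seq_len num_levels embed_dim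
instance (base_seq_len : Int) (num_levels : Int) (embed_dim : Int) (out : List (Int × Int)) : Decidable (Spec_create_multiscale_shapes base_seq_len num_levels embed_dim out) := by unfold Spec_create_multiscale_shapes; infer_instance

-- ===== CLAIM (what is proved, stated in full; the proofs are below) =====
def Claim_equal_create_multiscale_shapes : Prop := ∀ (base_seq_len : Int) (num_levels : Int) (embed_dim : Int), Dom_create_multiscale_shapes base_seq_len num_levels embed_dim → Spec_create_multiscale_shapes base_seq_len num_levels embed_dim (create_multiscale_shapes base_seq_len num_levels embed_dim)

-- ===== LEMMAS AND PROOFS =====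

-- arithmetic right shift is floor division by a power of two
theorem shiftr_eq_floordiv (b : Int) (n : Nat) :
    b >>> n = PySem.Int.floordiv b (2 ^ n) := by
  rw [PySem.Int.floordiv_eq_ediv_of_pos (by positivity), Int.shiftRight_eq_div_pow]
  push_cast
  rfl

-- one more halving advances the shift
theorem floordiv_shiftr_succ (b : Int) (n : Nat) :
    PySem.Int.floordiv (b >>> n) 2 = b >>> (n + 1) := by
  rw [shiftr_eq_floordiv, shiftr_eq_floordiv,
      PySem.Int.floordiv_eq_ediv_of_pos (b := (2:Int) ^ n) (by positivity),
      PySem.Int.floordiv_eq_ediv_of_pos (b := (2:Int)) (by norm_num),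
      PySem.Int.floordiv_eq_ediv_of_pos (b := (2:Int) ^ (n + 1)) (by positivity),
      pow_succ]
  exact Int.ediv_ediv_of_nonneg (by positivity)

-- invariant of A's loop after n iterations
theorem loop_inv (b e : Int) (n : Nat) :
    (PySem.List.pyRange 0 (n : Int) 1).foldl
      (fun (st : List (Int × Int) × Int) (_level : Int) =>
        (st.1 ++ [(st.2, e)], PySem.Int.floordiv st.2 2))
      ([], b)
    = ((PySem.List.pyRange 0 (n : Int) 1).map
        (fun level => (b >>> level.toNat, e)),
       b >>> n) := by
  induction n with
  | zero => simp [PySem.List.pyRange_one_eq_nil (by norm_num : (0:Int) ≤ 0), PySem.Int.floordiv]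
  | succ n ih =>
    have hcast : ((n + 1 : Nat) : Int) = (n : Int) + 1 := by push_cast; ring
    rw [hcast, PySem.List.pyRange_one_succ_right (by positivity),
        List.foldl_append, List.map_append, ih]
    simp [floordiv_shiftr_succ]
    constructor
    · exact (Int.shiftRight_natCast_right b n).symm
    · rw [← PySem.Int.floordiv_eq_ediv_of_pos (b := (2:Int)) (by norm_num)]
      exact floordiv_shiftr_succ b n

-- ===== VERDICT (by name: the statement is the Claim_ definition above) =====
theorem create_multiscale_shapes_spec : Claim_equal_create_multiscale_shapes := by
  intro b n e _
  unfold Spec_create_multiscale_shapes create_multiscale_shapes create_multiscale_shapes_alt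
  by_cases h : n ≤ 0
  · simp [PySem.List.pyRange_one_eq_nil h]
  · have hn : n = ((n.toNat : Nat) : Int) := by omega
    rw [hn, loop_inv]
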